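-- pv_equiv track=rewrite | github.com/boubacar-sow/ACSR | src/acsr/decoding_copy.py | syllabify_ipa
-- ===== SOURCE A (Python) =====
-- def syllabify_ipa(ipa_text):
--     consonants = {"b", "d", "f", "g", "h", "j", "k", "l", "m", "n", "n~", "p", "r", "s", "s^", "t", "v", "w", "z", "z^", "ng", "gn"}
--     vowels = {"a", "a~", "e", "e^", "e~", "i", "o", "o^", "o~", "u", "y", "x", "x^", "x~"}
--     phonemes = ipa_text.split()
--     syllables = []
--     i = 0
--
--     while i < len(phonemes):
--         phone = phonemes[i]
--         if phone in vowels: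
--             syllables.append(phone)
--             i += 1
--         elif phone in consonants:
--             # Check if there is a next phone
--             if i + 1 < len(phonemes):
--                 next_phone = phonemes[i + 1]
--                 if next_phone in vowels:
--                     syllable = phone + next_phone
--                     syllables.append(syllable)
--                     i += 2
--                 else:
--                     syllables.append(phone)
--                     i += 1
--             else:
--                 syllables.append(phone)
--                 i += 1
--         else:
--             i += 1
--     return syllables
-- ===== SOURCE B (Python) =====
-- def syllabify_ipa(ipa_text):
--     consonants = {"b", "d", "f", "g", "h", "j", "k", "l", "m", "n", "n~", "p", "r", "s", "s^", "t", "v", "w", "z", "z^", "ng", "gn"}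
--     vowels = {"a", "a~", "e", "e^", "e~", "i", "o", "o^", "o~", "u", "y", "x", "x^", "x~"}
--     syllables = []
--     pending = None  # a consonant waiting for a possible vowel
--     for phone in ipa_text.split():
--         if phone in vowels:
--             if pending is not None:
--                 syllables.append(pending + phone)
--                 pending = None
--             else:
--                 syllables.append(phone)
--         elif phone in consonants:
--             if pending is not None:
--                 syllables.append(pending)
--             pending = phone
--         else:
--             if pending is not None:
--                 syllables.append(pending)
--                 pending = None
--     if pending is not None:
--         syllables.append(pending)
--     return syllables
-- ===== Notes on version B (the rewrite author's own statement) =====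
-- stated objective: simpler
-- what changed: Replaced the index-based while loop with i+=2 look-ahead by a single forward for-loop over the phonemes that defers each consonant in a single held-back variable and flushes it on the next vowel (combined), consonant/unknown token (standalone), or end of input.
import Mathlib
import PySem

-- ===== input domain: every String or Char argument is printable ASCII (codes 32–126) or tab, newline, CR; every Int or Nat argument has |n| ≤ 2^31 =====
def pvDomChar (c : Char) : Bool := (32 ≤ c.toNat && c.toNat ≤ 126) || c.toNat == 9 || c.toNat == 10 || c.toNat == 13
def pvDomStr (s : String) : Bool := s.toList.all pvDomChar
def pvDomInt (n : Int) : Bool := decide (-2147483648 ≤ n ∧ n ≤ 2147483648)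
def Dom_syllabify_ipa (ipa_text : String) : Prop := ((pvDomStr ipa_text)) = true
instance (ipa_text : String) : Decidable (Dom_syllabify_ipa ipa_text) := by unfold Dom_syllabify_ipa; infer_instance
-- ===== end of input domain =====

-- B replaces A's index-based while loop with i+=2 look-ahead by a single forward pass
-- holding one deferred consonant (objective: simpler decomposition; same output).

-- ===== PORT A =====
-- the two literal Python sets (shared constants of the module)
def pvConsonants : PySem.Set String :=
  PySem.Set.ofList ["b", "d", "f", "g", "h", "j", "k", "l", "m", "n", "n~", "p", "r", "s", "s^", "t", "v", "w", "z", "z^", "ng", "gn"]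
def pvVowels : PySem.Set String :=
  PySem.Set.ofList ["a", "a~", "e", "e^", "e~", "i", "o", "o^", "o~", "u", "y", "x", "x^", "x~"]

-- A's while-loop over the phoneme list: one step per branch, 'i += 2' = dropping two elements
def syllabify_ipa_loop (phonemes : List String) : List String :=
  match phonemes with
  | [] => []
  | phone :: rest =>
    if pvVowels.contains phone then
      phone :: syllabify_ipa_loop rest
    else if pvConsonants.contains phone then
      match rest with
      | next_phone :: rest2 =>
        if pvVowels.contains next_phone then
          (phone ++ next_phone) :: syllabify_ipa_loop rest2
        else
          phone :: syllabify_ipa_loop (next_phone :: rest2)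
      | [] => [phone]
    else
      syllabify_ipa_loop rest
termination_by phonemes.length
decreasing_by all_goals simp_all

def syllabify_ipa (ipa_text : String) : List String :=
  syllabify_ipa_loop (PySem.Str.split₀ ipa_text)

-- ===== PORT B =====
-- one step of B's for-loop: state = (syllables so far, pending consonant)
def pvStepB (st : List String × Option String) (phone : String) : List String × Option String :=
  if pvVowels.contains phone then
    match st.2 with
    | some c => (st.1 ++ [c ++ phone], none)
    | none => (st.1 ++ [phone], none)
  else if pvConsonants.contains phone then
    match st.2 with
    | some c => (st.1 ++ [c], some phone)
    | none => (st.1, some phone)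
  else
    match st.2 with
    | some c => (st.1 ++ [c], none)
    | none => (st.1, none)

-- B's final flush of the pending consonant
def pvFinishB (st : List String × Option String) : List String :=
  match st.2 with
  | some c => st.1 ++ [c]
  | none => st.1

def syllabify_ipa_alt (ipa_text : String) : List String :=
  pvFinishB ((PySem.Str.split₀ ipa_text).foldl pvStepB ([], none))

-- ===== PRECONDITION & SPEC =====
def Spec_syllabify_ipa (ipa_text : String) (out : List String) : Prop := out = syllabify_ipa_alt ipa_text
instance (ipa_text : String) (out : List String) : Decidable (Spec_syllabify_ipa ipa_text out) := by unfold Spec_syllabify_ipa; infer_instance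

-- ===== CLAIM (what is proved, stated in full; the proofs are below) =====
def Claim_equal_syllabify_ipa : Prop := ∀ (ipa_text : String), Dom_syllabify_ipa ipa_text → Spec_syllabify_ipa ipa_text (syllabify_ipa ipa_text)

-- ===== LEMMAS AND PROOFS =====

-- accumulator-free recursive form of B's loop (proof device only)
def pvRecB (pending : Option String) (l : List String) : List String :=
  match l with
  | [] => match pending with | some c => [c] | none => []
  | x :: rest =>
    if pvVowels.contains x then
      (match pending with | some c => [c ++ x] | none => [x]) ++ pvRecB none rest
    else if pvConsonants.contains x then
      (match pending with | some c => [c] | none => []) ++ pvRecB (some x) rest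
    else
      (match pending with | some c => [c] | none => []) ++ pvRecB none rest

theorem pvFold_eq_rec (l : List String) :
    ∀ (acc : List String) (p : Option String),
      pvFinishB (l.foldl pvStepB (acc, p)) = acc ++ pvRecB p l := by
  induction l with
  | nil =>
    intro acc p
    cases p <;> simp [pvFinishB, pvRecB]
  | cons x rest ih =>
    intro acc p
    simp only [List.foldl_cons]
    cases p <;>
      simp only [pvStepB, pvRecB] <;>
      split_ifs <;>
      simp [ih, List.append_assoc]

-- in B the pending consonant is always a consonant and not a vowel; under that
-- hypothesis B's recursion computes exactly A's loop
theorem pvLoop_skip (x : String) (rest : List String)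
    (hv : x ∉ pvVowels) (hc : x ∉ pvConsonants) :
    syllabify_ipa_loop (x :: rest) = syllabify_ipa_loop rest := by
  rw [syllabify_ipa_loop.eq_def]
  simp [hv, hc]

theorem pvRecB_eq_loop (l : List String) :
    pvRecB none l = syllabify_ipa_loop l ∧
    ∀ c, c ∉ pvVowels → c ∈ pvConsonants →
      pvRecB (some c) l = syllabify_ipa_loop (c :: l) := by
  induction l with
  | nil =>
    refine ⟨by simp [pvRecB, syllabify_ipa_loop], fun c hv hc => ?_⟩
    simp [pvRecB, syllabify_ipa_loop, hv, hc]
  | cons x rest ih =>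
    obtain ⟨ih0, ih1⟩ := ih
    constructor
    · by_cases hv : x ∈ pvVowels
      · conv_rhs => rw [syllabify_ipa_loop.eq_def]
        simp [pvRecB, hv, ih0]
      · by_cases hc : x ∈ pvConsonants
        · simp [pvRecB, hv, hc, ih1 x hv hc]
        · rw [pvLoop_skip x rest hv hc]
          simp [pvRecB, hv, hc, ih0]
    · intro c hvc hcc
      by_cases hv : x ∈ pvVowels
      · simp [pvRecB, syllabify_ipa_loop, hv, hvc, hcc, ih0]
      · by_cases hc : x ∈ pvConsonants
        · simp [pvRecB, syllabify_ipa_loop, hv, hc, hvc, hcc, ih1 x hv hc]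
        · conv_rhs => rw [syllabify_ipa_loop.eq_def]
          simp [pvRecB, hv, hc, hvc, hcc, ih0, pvLoop_skip x rest hv hc]

-- ===== VERDICT (by name: the statement is the Claim_ definition above) =====
theorem syllabify_ipa_spec : Claim_equal_syllabify_ipa := by
  intro s _
  unfold Spec_syllabify_ipa syllabify_ipa syllabify_ipa_alt
  rw [pvFold_eq_rec, List.nil_append, (pvRecB_eq_loop _).1]
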